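-- pv_equiv track=rewrite | github.com/notRadman/Hemmah | hemmah.py | count_indentation_level
-- ===== SOURCE A (Python) =====
-- def count_indentation_level(line):
--     """Calculate indentation level (tabs or spaces)
--     - Each tab = one level
--     - Each 4 spaces = one level (or less)
--     """
--     indent = 0
--     i = 0
--     while i < len(line):
--         if line[i] == '\t':
--             indent += 1
--             i += 1
--         elif line[i] == ' ':
--             # Count consecutive spaces
--             spaces = 0
--             while i < len(line) and line[i] == ' ':
--                 spaces += 1
--                 i += 1
--             # Each 2-4 spaces = one level
--             indent += max(1, spaces // 3)
--         else:
--             break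
--     return indent
-- ===== SOURCE B (Python) =====
-- def count_indentation_level(line):
--     ws = len(line) - len(line.lstrip(' \t'))
--     chunks = line[:ws].split('\t')
--     return (len(chunks) - 1) + sum(max(1, len(c) // 3) for c in chunks if c)
-- ===== Notes on version B (the rewrite author's own statement) =====
-- stated objective: simpler
-- what changed: Replaced the index-driven outer/inner while loops by slicing off the leading-whitespace prefix, splitting it on tabs, and summing per-chunk contributions (tabs = len(chunks)-1, each nonempty space chunk = max(1, len//3)).
import Mathlib
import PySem

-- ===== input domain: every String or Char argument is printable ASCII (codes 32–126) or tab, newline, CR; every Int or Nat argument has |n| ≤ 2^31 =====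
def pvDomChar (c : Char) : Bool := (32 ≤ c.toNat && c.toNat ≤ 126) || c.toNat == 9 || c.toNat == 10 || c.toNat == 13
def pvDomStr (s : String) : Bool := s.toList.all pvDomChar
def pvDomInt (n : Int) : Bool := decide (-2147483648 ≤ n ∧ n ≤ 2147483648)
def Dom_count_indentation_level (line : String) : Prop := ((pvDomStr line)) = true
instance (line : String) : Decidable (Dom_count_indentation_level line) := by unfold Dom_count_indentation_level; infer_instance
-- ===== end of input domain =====

-- B replaces A's index-driven nested while loops by: take the leading-whitespace prefix,
-- split it on tabs, and sum the contributions (objective: simpler).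

-- ===== PORT A =====
-- A's outer while becomes structural recursion on the character list; the inner
-- space-counting while becomes takeWhile/dropWhile over the same run of spaces.
def pvAGo : List Char → Int
  | [] => 0
  | c :: cs =>
    if c = '\t' then 1 + pvAGo cs
    else if c = ' ' then
      -- spaces = length of the consecutive-space run starting at c
      let spaces : Nat := 1 + (cs.takeWhile (· == ' ')).length
      ((max 1 (spaces / 3) : Nat) : Int) + pvAGo (cs.dropWhile (· == ' '))
    else 0
termination_by l => l.length
decreasing_by
  · simp
  · exact Nat.lt_succ_of_le (cs.dropWhile_sublist _ |>.length_le)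

def count_indentation_level (line : String) : Int := pvAGo line.toList

-- ===== PORT B =====
def pvIsWs (c : Char) : Bool := c == ' ' || c == '\t'

-- hand port of Python's str.split('\t') on a list of chars (exact for a one-char separator)
def pvSplitTab : List Char → List (List Char)
  | [] => [[]]
  | c :: cs =>
    if c = '\t' then [] :: pvSplitTab cs
    else
      match pvSplitTab cs with
      | h :: tl => (c :: h) :: tl
      | [] => [[c]]

-- Source B: prefix = line[:len(line)-len(line.lstrip(' \t'))], i.e. the leading-ws prefix (= takeWhile);
-- chunks = prefix.split('\t'); result = (len(chunks)-1) + sum(max(1, len(c)//3) for c in chunks if c)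
def count_indentation_level_alt (line : String) : Int :=
  let chunks := pvSplitTab (line.toList.takeWhile pvIsWs)
  ((chunks.length : Int) - 1) +
    ((chunks.filter (fun c => !c.isEmpty)).map
      (fun c => ((max 1 (c.length / 3) : Nat) : Int))).sum

-- ===== PRECONDITION & SPEC =====
def Spec_count_indentation_level (line : String) (out : Int) : Prop := out = count_indentation_level_alt line
instance (line : String) (out : Int) : Decidable (Spec_count_indentation_level line out) := by unfold Spec_count_indentation_level; infer_instance

-- ===== CLAIM (what is proved, stated in full; the proofs are below) =====
def Claim_equal_count_indentation_level : Prop := ∀ (line : String), Dom_count_indentation_level line → Spec_count_indentation_level line (count_indentation_level line)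

-- ===== LEMMAS AND PROOFS =====

-- B's value as a function of the whitespace prefix
def pvBVal (pre : List Char) : Int :=
  ((pvSplitTab pre).length : Int) - 1 +
    (((pvSplitTab pre).filter (fun c => !c.isEmpty)).map
      (fun c => ((max 1 (c.length / 3) : Nat) : Int))).sum

theorem pvSplitTab_ne_nil : ∀ l, pvSplitTab l ≠ [] := by
  intro l
  induction l with
  | nil => simp [pvSplitTab]
  | cons c cs ih =>
    simp only [pvSplitTab]
    split
    · simp
    · cases h : pvSplitTab cs with
      | nil => simp
      | cons a b => simp

theorem pvSplitTab_append (s : List Char) (hs : ∀ c ∈ s, c ≠ '\t') :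
    ∀ r h tl, pvSplitTab r = h :: tl → pvSplitTab (s ++ r) = (s ++ h) :: tl := by
  induction s with
  | nil => intro r h tl hr; simpa using hr
  | cons c s' ih =>
    intro r h tl hr
    have hc : c ≠ '\t' := hs c (by simp)
    have : pvSplitTab (s' ++ r) = (s' ++ h) :: tl := ih (fun x hx => hs x (by simp [hx])) r h tl hr
    simp only [List.cons_append, pvSplitTab, if_neg hc, this]

theorem pv_tw_tw : ∀ l : List Char,
    (l.takeWhile pvIsWs).takeWhile (· == ' ') = l.takeWhile (· == ' ') := by
  intro l
  induction l with
  | nil => rfl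
  | cons c cs ih =>
    by_cases hsp : c = ' '
    · subst hsp; simp [pvIsWs, ih]
    · by_cases htb : c = '\t'
      · subst htb; simp [pvIsWs]
      · simp [pvIsWs, hsp, htb]

theorem pv_dw_tw : ∀ l : List Char,
    (l.takeWhile pvIsWs).dropWhile (· == ' ') = (l.dropWhile (· == ' ')).takeWhile pvIsWs := by
  intro l
  induction l with
  | nil => rfl
  | cons c cs ih =>
    by_cases hsp : c = ' '
    · subst hsp; simp [pvIsWs, ih]
    · by_cases htb : c = '\t'
      · subst htb; simp [pvIsWs]
      · simp [pvIsWs, hsp, htb]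

-- r = the part of a ws-prefix after its leading spaces: either empty or starts with '\t'
theorem pv_rest_shape (t : List Char) (ht : ∀ c ∈ t, pvIsWs c = true) :
    t.dropWhile (· == ' ') = [] ∨ ∃ r', t.dropWhile (· == ' ') = '\t' :: r' := by
  cases h : t.dropWhile (· == ' ') with
  | nil => exact Or.inl rfl
  | cons a r' =>
    right
    refine ⟨r', ?_⟩
    have ha : a ∈ t := (t.dropWhile_sublist (· == ' ')).subset (by simp [h])
    have hws : pvIsWs a = true := ht a ha
    have hnsp : ¬ (a == ' ') = true := by
      have := List.head?_dropWhile_not (· == ' ') t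
      rw [h] at this; simpa using this
    have : a = '\t' := by
      simp only [pvIsWs, Bool.or_eq_true, beq_iff_eq] at hws
      rcases hws with h1 | h1
      · exact absurd (by simp [h1]) hnsp
      · exact h1
    rw [this]

theorem pvBVal_tab (t : List Char) : pvBVal ('\t' :: t) = 1 + pvBVal t := by
  cases h : pvSplitTab t with
  | nil => exact absurd h (pvSplitTab_ne_nil t)
  | cons a b =>
    by_cases ha : a = []
    · subst ha; simp [pvBVal, pvSplitTab, h]; ring
    · simp [pvBVal, pvSplitTab, h, ha]; ring

theorem pvBVal_space (t : List Char) (ht : ∀ c ∈ t, pvIsWs c = true) :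
    pvBVal (' ' :: t) =
      ((max 1 ((1 + (t.takeWhile (· == ' ')).length) / 3) : Nat) : Int)
        + pvBVal (t.dropWhile (· == ' ')) := by
  have hns : ∀ c ∈ (' ' :: t.takeWhile (· == ' ')), c ≠ '\t' := by
    intro c hc
    rcases List.mem_cons.mp hc with h | h
    · subst h; decide
    · have hsp : (c == ' ') = true := List.mem_takeWhile_imp (p := fun x => x == ' ') (l := t) h
      intro hct; rw [hct] at hsp; simp at hsp
  have hdecomp : (' ' :: t) = (' ' :: t.takeWhile (· == ' ')) ++ t.dropWhile (· == ' ') := by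
    simp
  have hlen : (' ' :: t.takeWhile (· == ' ')).length = 1 + (t.takeWhile (· == ' ')).length := by
    simp [Nat.add_comm]
  rcases pv_rest_shape t ht with hnil | ⟨r', hr'⟩
  · have hmain : pvSplitTab (' ' :: t) = [(' ' :: t.takeWhile (· == ' '))] := by
      rw [hdecomp, hnil, List.append_nil]
      have := pvSplitTab_append (' ' :: t.takeWhile (· == ' ')) hns [] [] [] rfl
      simpa using this
    rw [pvBVal, pvBVal, hmain, hnil]
    simp [pvSplitTab, hlen]
  · have h1 : pvSplitTab (t.dropWhile (· == ' ')) = [] :: pvSplitTab r' := by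
      rw [hr']; simp [pvSplitTab]
    cases h2 : pvSplitTab r' with
    | nil => exact absurd h2 (pvSplitTab_ne_nil r')
    | cons a b =>
      have hsp : pvSplitTab (' ' :: t) = (' ' :: t.takeWhile (· == ' ')) :: a :: b := by
        rw [hdecomp]
        have := pvSplitTab_append (' ' :: t.takeWhile (· == ' ')) hns
          (t.dropWhile (· == ' ')) [] (a :: b) (by rw [h1, h2])
        simpa using this
      rw [pvBVal, pvBVal, hsp, h1, h2]
      by_cases ha : a = []
      · subst ha; simp [hlen]; ring
      · simp [hlen, ha]; ring

theorem pvBVal_nonws (c : Char) (cs : List Char) (hc : pvIsWs c = false) :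
    pvBVal ((c :: cs).takeWhile pvIsWs) = 0 := by
  simp [hc, pvBVal, pvSplitTab]

theorem pv_main : ∀ n cs, cs.length ≤ n → pvAGo cs = pvBVal (cs.takeWhile pvIsWs) := by
  intro n
  induction n with
  | zero =>
    intro cs h
    have : cs = [] := List.eq_nil_of_length_eq_zero (Nat.le_zero.mp h)
    subst this; simp [pvAGo, pvBVal, pvSplitTab]
  | succ n ih =>
    intro cs h
    cases cs with
    | nil => simp [pvAGo, pvBVal, pvSplitTab]
    | cons c cs =>
      by_cases htb : c = '\t'
      · subst htb
        rw [pvAGo, if_pos rfl]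
        have ht : List.takeWhile pvIsWs ('\t' :: cs) = '\t' :: List.takeWhile pvIsWs cs := by
          simp [pvIsWs]
        rw [ht, pvBVal_tab, ih cs (by simpa using Nat.succ_le_succ_iff.mp h)]
      · by_cases hsp : c = ' '
        · subst hsp
          rw [pvAGo, if_neg (by decide), if_pos rfl]
          have ht : List.takeWhile pvIsWs (' ' :: cs) = ' ' :: List.takeWhile pvIsWs cs := by
            simp [pvIsWs]
          rw [ht, pvBVal_space _ (fun c hc => List.mem_takeWhile_imp hc)]
          have hlen : (cs.dropWhile (· == ' ')).length ≤ n := by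
            have := (cs.dropWhile_sublist (· == ' ')).length_le
            have hcs : cs.length ≤ n := Nat.succ_le_succ_iff.mp (by simpa using h)
            omega
          rw [ih _ hlen, pv_tw_tw, pv_dw_tw]
        · rw [pvAGo, if_neg htb, if_neg hsp,
              pvBVal_nonws c cs (by simp [pvIsWs, hsp, htb])]

-- ===== VERDICT (by name: the statement is the Claim_ definition above) =====
theorem count_indentation_level_spec : Claim_equal_count_indentation_level := by
  intro line _
  show count_indentation_level line = count_indentation_level_alt line
  rw [count_indentation_level, pv_main line.toList.length line.toList le_rfl]
  rfl
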